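-- pv_equiv track=rewrite | github.com/gladisor/BlackJack-RL | monte.py | count_aces
-- ===== SOURCE A (Python) =====
-- def count_aces(hand):
-- 	aces = 0
-- 	total = 0
-- 	for card in hand:
-- 		if card != 1:
-- 			total += card
-- 		else:
-- 			aces += 1
-- 	return aces, total
-- ===== SOURCE B (Python) =====
-- def count_aces(hand):
-- 	aces = hand.count(1)
-- 	return aces, sum(hand) - aces
-- ===== Notes on version B (the rewrite author's own statement) =====
-- stated objective: simpler
-- what changed: Replaces the single accumulator loop with if/else branching by two built-in scans: aces = hand.count(1) and total derived arithmetically as sum(hand) - aces.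
import Mathlib
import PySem

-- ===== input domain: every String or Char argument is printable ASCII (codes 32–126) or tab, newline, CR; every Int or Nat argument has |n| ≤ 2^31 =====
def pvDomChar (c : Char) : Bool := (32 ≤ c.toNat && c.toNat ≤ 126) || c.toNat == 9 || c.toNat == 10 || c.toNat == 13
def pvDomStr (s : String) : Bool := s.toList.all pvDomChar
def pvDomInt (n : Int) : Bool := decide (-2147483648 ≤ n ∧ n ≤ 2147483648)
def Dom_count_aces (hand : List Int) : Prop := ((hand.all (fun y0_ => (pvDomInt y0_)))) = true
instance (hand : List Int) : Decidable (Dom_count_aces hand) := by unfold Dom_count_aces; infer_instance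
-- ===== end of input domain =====

-- B replaces A's single accumulator loop (if/else branch) by two library scans: aces = hand.count(1) and total = sum(hand) - aces (objective: simpler).


-- ===== PORT A =====
-- Port of A: one fold over the hand with an (aces, total) accumulator, branch order as in A.
def count_aces (hand : List Int) : Int × Int :=
  hand.foldl (fun st card =>
    if card ≠ 1 then (st.1, st.2 + card) else (st.1 + 1, st.2)) (0, 0)

-- ===== PORT B =====
-- Port of B: aces via library count, total as sum(hand) - aces.
def count_aces_alt (hand : List Int) : Int × Int :=
  ((hand.count 1 : Int), hand.sum - (hand.count 1 : Int))

-- ===== PRECONDITION & SPEC =====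
def Spec_count_aces (hand : List Int) (out : Int × Int) : Prop := out = count_aces_alt hand
instance (hand : List Int) (out : Int × Int) : Decidable (Spec_count_aces hand out) := by unfold Spec_count_aces; infer_instance

-- ===== CLAIM (what is proved, stated in full; the proofs are below) =====
def Claim_equal_count_aces : Prop := ∀ (hand : List Int), Dom_count_aces hand → Spec_count_aces hand (count_aces hand)

-- ===== LEMMAS AND PROOFS =====

-- ===== VERDICT (by name: the statement is the Claim_ definition above) =====
theorem foldl_count_aces (hand : List Int) (a t : Int) :
    hand.foldl (fun st card =>
      if card ≠ 1 then (st.1, st.2 + card) else (st.1 + 1, st.2)) (a, t)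
    = (a + (hand.count 1 : Int), t + hand.sum - (hand.count 1 : Int)) := by
  induction hand generalizing a t with
  | nil => simp
  | cons c rest ih =>
    rw [List.foldl_cons]
    by_cases h : c = 1
    · subst h
      have hstep : (if (1 : Int) ≠ 1 then (((a, t) : Int × Int).1, ((a, t) : Int × Int).2 + 1)
          else (((a, t) : Int × Int).1 + 1, ((a, t) : Int × Int).2)) = ((a + 1, t) : Int × Int) := by
        simp
      rw [hstep, ih]
      simp
      constructor <;> ring
    · have hstep : (if c ≠ 1 then (((a, t) : Int × Int).1, ((a, t) : Int × Int).2 + c)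
          else (((a, t) : Int × Int).1 + 1, ((a, t) : Int × Int).2)) = ((a, t + c) : Int × Int) := by
        simp [h]
      rw [hstep, ih]
      simp [h]
      ring

theorem count_aces_spec : Claim_equal_count_aces := by
  intro hand _
  unfold Spec_count_aces count_aces count_aces_alt
  rw [foldl_count_aces]
  simp
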